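-- pv_equiv track=rewrite | github.com/ernes7/snb | blueprints/versus/services.py | _first_scorer
-- ===== SOURCE A (Python) =====
-- def _first_scorer(home_ls: list[int], away_ls: list[int]) -> str | None:
--     """Return 'home', 'away', or None based on which team scored first.
--
--     Away bats top of each inning, so within inning i: if away_ls[i] > 0, away
--     scored first; otherwise if home_ls[i] > 0, home scored first.
--     """
--     n = max(len(home_ls), len(away_ls))
--     for i in range(n):
--         a = away_ls[i] if i < len(away_ls) else 0
--         h = home_ls[i] if i < len(home_ls) else 0
--         if a > 0:
--             return "away"
--         if h > 0:
--             return "home"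
--     return None
-- ===== SOURCE B (Python) =====
-- def _first_scorer(home_ls: list[int], away_ls: list[int]) -> str | None:
--     """Two independent searches for each team's first scoring inning,
--     then a comparison (away wins ties: away bats first within an inning)."""
--     first_away = next((i for i, v in enumerate(away_ls) if v > 0), None)
--     first_home = next((i for i, v in enumerate(home_ls) if v > 0), None)
--     if first_away is None and first_home is None:
--         return None
--     if first_home is None:
--         return "away"
--     if first_away is None:
--         return "home"
--     return "away" if first_away <= first_home else "home"
-- ===== Notes on version B (the rewrite author's own statement) =====
-- stated objective: alternative
-- what changed: Replaces A's single interleaved early-exit scan over padded innings by two independent first-positive-index searches (next/enumerate) followed by an index comparison with away winning ties.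
import Mathlib
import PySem

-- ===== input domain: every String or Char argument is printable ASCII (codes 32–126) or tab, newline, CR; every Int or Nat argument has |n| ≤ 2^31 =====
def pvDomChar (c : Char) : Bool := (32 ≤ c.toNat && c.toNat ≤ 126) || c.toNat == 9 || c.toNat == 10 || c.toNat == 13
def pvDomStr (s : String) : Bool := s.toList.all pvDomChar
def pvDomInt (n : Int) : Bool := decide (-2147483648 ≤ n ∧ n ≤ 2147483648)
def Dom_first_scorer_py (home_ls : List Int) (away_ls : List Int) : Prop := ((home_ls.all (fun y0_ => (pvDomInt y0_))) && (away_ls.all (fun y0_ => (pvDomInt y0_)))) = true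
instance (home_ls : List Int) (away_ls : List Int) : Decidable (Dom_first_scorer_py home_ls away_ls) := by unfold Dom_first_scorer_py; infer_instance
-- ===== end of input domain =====

-- B recomputes the same result by two independent first-positive-index searches plus an index comparison (objective: alternative decomposition, same cost).
-- ===== PORT A =====
-- A's for-loop over range(n) with early return: fuel-indexed recursion over the
-- remaining iteration count; the guarded padded access 'xs[i] if i < len(xs) else 0'
-- is exactly List.getD (in-range access never raises, out of range yields 0).
def pvAloop (home_ls : List Int) (away_ls : List Int) : Nat → Nat → Option String
  | _, 0 => none
  | i, fuel+1 =>
    let a : Int := if i < away_ls.length then away_ls.getD i 0 else 0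
    let h : Int := if i < home_ls.length then home_ls.getD i 0 else 0
    if a > 0 then some "away"
    else if h > 0 then some "home"
    else pvAloop home_ls away_ls (i+1) fuel

def first_scorer_py (home_ls : List Int) (away_ls : List Int) : Option String :=
  pvAloop home_ls away_ls 0 (max home_ls.length away_ls.length)

-- ===== PORT B =====
-- next((i for i, v in enumerate(ls) if v > 0), None)
def pvFirstPos : List Int → Nat → Option Nat
  | [], _ => none
  | v :: t, i => if v > 0 then some i else pvFirstPos t (i+1)

def first_scorer_py_alt (home_ls : List Int) (away_ls : List Int) : Option String :=
  let first_away := pvFirstPos away_ls 0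
  let first_home := pvFirstPos home_ls 0
  match first_away, first_home with
  | none, none => none
  | some _, none => some "away"
  | none, some _ => some "home"
  | some ia, some ih => if ia ≤ ih then some "away" else some "home"

-- ===== PRECONDITION & SPEC =====
def Spec_first_scorer_py (home_ls : List Int) (away_ls : List Int) (out : Option String) : Prop := out = first_scorer_py_alt home_ls away_ls
instance (home_ls : List Int) (away_ls : List Int) (out : Option String) : Decidable (Spec_first_scorer_py home_ls away_ls out) := by unfold Spec_first_scorer_py; infer_instance

-- ===== CLAIM (what is proved, stated in full; the proofs are below) =====
def Claim_equal_first_scorer_py : Prop := ∀ (home_ls : List Int) (away_ls : List Int), Dom_first_scorer_py home_ls away_ls → Spec_first_scorer_py home_ls away_ls (first_scorer_py home_ls away_ls)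

-- ===== LEMMAS AND PROOFS =====


theorem pv_guard_zero (l : List Int) : (if 0 < l.length then l.getD 0 0 else 0) = l.getD 0 0 := by
  cases l <;> simp

theorem pv_guard_tail (l : List Int) (i : Nat) :
    (if i < l.tail.length then l.tail.getD i 0 else 0)
      = (if i+1 < l.length then l.getD (i+1) 0 else 0) := by
  cases l with
  | nil => simp
  | cons v t =>
    simp only [List.tail_cons, List.length_cons, List.getD_cons_succ]
    split_ifs <;> first | rfl | omega

theorem pv_shift (fuel : Nat) : ∀ (home_ls away_ls : List Int) (i : Nat),
    pvAloop home_ls away_ls (i+1) fuel = pvAloop home_ls.tail away_ls.tail i fuel := by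
  induction fuel with
  | zero => intro h a i; rfl
  | succ n ih => intro h a i; simp only [pvAloop, pv_guard_tail, ih]

theorem pv_aloop_head (h a : List Int) (n : Nat) :
    pvAloop h a 0 (n+1)
      = if a.getD 0 0 > 0 then some "away"
        else if h.getD 0 0 > 0 then some "home" else pvAloop h.tail a.tail 0 n := by
  simp only [pvAloop, pv_guard_zero]
  rw [show pvAloop h a 1 n = pvAloop h a (0+1) n from rfl, pv_shift]

theorem pv_firstPos_succ (l : List Int) : ∀ i, pvFirstPos l (i+1) = (pvFirstPos l i).map (·+1) := by
  induction l with
  | nil => intro i; rfl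
  | cons v t ih =>
    intro i
    by_cases hv : v > 0 <;> simp [pvFirstPos, hv, ih (i+1)]

theorem pv_firstPos_head (l : List Int) :
    pvFirstPos l 0 = if l.getD 0 0 > 0 then some 0 else (pvFirstPos l.tail 0).map (·+1) := by
  cases l with
  | nil => simp [pvFirstPos, List.getD]
  | cons v t =>
    by_cases hv : v > 0 <;> simp [pvFirstPos, hv, pv_firstPos_succ]

theorem pv_alt_head (h a : List Int) :
    first_scorer_py_alt h a
      = if a.getD 0 0 > 0 then some "away"
        else if h.getD 0 0 > 0 then some "home" else first_scorer_py_alt h.tail a.tail := by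
  rcases hfa : pvFirstPos a.tail 0 with _ | ia <;> rcases hfh : pvFirstPos h.tail 0 with _ | ihh <;>
    simp only [first_scorer_py_alt, pv_firstPos_head, hfa, hfh] <;>
    split_ifs <;> simp <;> omega

theorem pv_main (fuel : Nat) : ∀ (h a : List Int), max h.length a.length = fuel →
    pvAloop h a 0 fuel = first_scorer_py_alt h a := by
  induction fuel with
  | zero =>
    intro h a hmax
    have hh : h = [] := by cases h <;> simp_all
    have ha : a = [] := by cases a <;> simp_all
    subst hh; subst ha; rfl
  | succ n ih =>
    intro h a hmax
    rw [pv_aloop_head, pv_alt_head,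
      ih h.tail a.tail (by cases h <;> cases a <;> simp_all <;> omega)]

-- ===== VERDICT (by name: the statement is the Claim_ definition above) =====
theorem first_scorer_py_spec : Claim_equal_first_scorer_py := by
  intro h a _
  unfold Spec_first_scorer_py first_scorer_py
  exact pv_main _ h a rfl
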